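-- pv_equiv track=rewrite | github.com/Lolleeee/MIEEG | packages/models/variational_autoencoder.py | _compute_encoder_spatial_dims
-- ===== SOURCE A (Python) =====
-- def _compute_encoder_spatial_dims(input_shape, num_layers):
--     '''Compute spatial dimensions at each encoder layer'''
--     dims = [input_shape]
--     h, w, d = input_shape
--
--     for i in range(num_layers):
--         if i == 0:  # First layer has stride 1
--             h_new, w_new, d_new = h, w, d
--         else:  # Subsequent layers have stride 2
--             # Formula: floor((n + 2*padding - kernel_size) / stride) + 1
--             h_new = (h + 2 * 1 - 3) // 2 + 1
--             w_new = (w + 2 * 1 - 3) // 2 + 1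
--             d_new = (d + 2 * 1 - 3) // 2 + 1
--
--         h, w, d = h_new, w_new, d_new
--         dims.append((h, w, d))
--
--     return dims
-- ===== SOURCE B (Python) =====
-- def _compute_encoder_spatial_dims(input_shape, num_layers):
--     '''Compute spatial dimensions at each encoder layer'''
--     h, w, d = input_shape
--     dims = [input_shape]
--     for j in range(1, num_layers + 1):
--         k = j - 1
--         dims.append((-(-h >> k), -(-w >> k), -(-d >> k)))
--     return dims
-- ===== Notes on version B (the rewrite author's own statement) =====
-- stated objective: simpler
-- what changed: Replaces the stateful loop that threads running (h,w,d) through an i==0 special case by a closed-form per-layer expression: layer j is the ceiling division of the ORIGINAL dims by 2**(j-1), computed as -(-x >> (j-1)); no carried state, no branch.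
import Mathlib
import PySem

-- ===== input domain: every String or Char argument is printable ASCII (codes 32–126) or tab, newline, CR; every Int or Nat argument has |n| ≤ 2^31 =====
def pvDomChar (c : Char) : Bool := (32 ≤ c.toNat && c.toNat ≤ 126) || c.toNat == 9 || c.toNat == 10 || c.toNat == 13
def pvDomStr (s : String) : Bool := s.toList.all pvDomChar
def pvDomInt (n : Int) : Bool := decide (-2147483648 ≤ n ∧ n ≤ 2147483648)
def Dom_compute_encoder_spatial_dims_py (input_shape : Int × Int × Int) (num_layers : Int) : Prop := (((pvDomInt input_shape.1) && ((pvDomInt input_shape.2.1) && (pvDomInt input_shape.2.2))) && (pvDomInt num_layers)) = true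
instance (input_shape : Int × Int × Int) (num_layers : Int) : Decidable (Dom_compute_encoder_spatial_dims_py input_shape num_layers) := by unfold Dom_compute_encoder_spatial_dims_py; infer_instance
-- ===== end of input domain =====

-- B replaces A's stateful loop (running h,w,d with an i==0 special case) by a closed-form
-- per-layer ceil-division of the original dims by 2^(j-1); objective: simpler.

-- ===== PORT A =====
-- one loop iteration of A: state is (dims, current (h,w,d))
def pvStepA (s : List (Int × Int × Int) × (Int × Int × Int)) (i : Int) :
    List (Int × Int × Int) × (Int × Int × Int) :=
  let h := s.2.1; let w := s.2.2.1; let d := s.2.2.2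
  let nw : Int × Int × Int :=
    if i = 0 then (h, w, d)
    else (PySem.Int.floordiv (h + 2 * 1 - 3) 2 + 1,
          PySem.Int.floordiv (w + 2 * 1 - 3) 2 + 1,
          PySem.Int.floordiv (d + 2 * 1 - 3) 2 + 1)
  (s.1 ++ [nw], nw)

def compute_encoder_spatial_dims_py (input_shape : Int × Int × Int) (num_layers : Int) :
    List (Int × Int × Int) :=
  ((PySem.List.pyRange 0 num_layers 1).foldl pvStepA ([input_shape], input_shape)).1

-- ===== PORT B =====
-- dims at layer j : ceiling division of each ORIGINAL dimension by 2^(j-1), via -(-x >> k)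
-- (Python's '-x >> k' on int is exactly Lean's '(-x) >>> k' on Int: arithmetic shift, floors)
def pvLayerB (h w d : Int) (j : Int) : Int × Int × Int :=
  let k : Nat := (j - 1).toNat
  (-((-h) >>> k), -((-w) >>> k), -((-d) >>> k))

def compute_encoder_spatial_dims_py_alt (input_shape : Int × Int × Int) (num_layers : Int) :
    List (Int × Int × Int) :=
  input_shape ::
    (PySem.List.pyRange 1 (num_layers + 1) 1).map
      (pvLayerB input_shape.1 input_shape.2.1 input_shape.2.2)

-- ===== PRECONDITION & SPEC =====
def Spec_compute_encoder_spatial_dims_py (input_shape : Int × Int × Int) (num_layers : Int) (out : List (Int × Int × Int)) : Prop := out = compute_encoder_spatial_dims_py_alt input_shape num_layers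
instance (input_shape : Int × Int × Int) (num_layers : Int) (out : List (Int × Int × Int)) : Decidable (Spec_compute_encoder_spatial_dims_py input_shape num_layers out) := by unfold Spec_compute_encoder_spatial_dims_py; infer_instance

-- ===== CLAIM (what is proved, stated in full; the proofs are below) =====
def Claim_equal_compute_encoder_spatial_dims_py : Prop := ∀ (input_shape : Int × Int × Int) (num_layers : Int), Dom_compute_encoder_spatial_dims_py input_shape num_layers → Spec_compute_encoder_spatial_dims_py input_shape num_layers (compute_encoder_spatial_dims_py input_shape num_layers)

-- ===== LEMMAS AND PROOFS =====

-- ceil-halving a ceil-quotient: ((⌈x/m⌉ + 2*1 - 3) // 2) + 1 = ⌈x/(2m)⌉, all via floor division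
lemma pv_ceil_half (x m : Int) (hm : 0 < m) :
    PySem.Int.floordiv (PySem.Int.floordiv (x + m - 1) m + 2 * 1 - 3) 2 + 1 =
    PySem.Int.floordiv (x + m * 2 - 1) (m * 2) := by
  rw [PySem.Int.floordiv_eq_ediv_of_pos hm,
      PySem.Int.floordiv_eq_ediv_of_pos (by omega : (0:Int) < 2),
      PySem.Int.floordiv_eq_ediv_of_pos (by positivity : (0:Int) < m * 2)]
  have h1 : x + m - 1 = (x - 1) + 1 * m := by ring
  have h2 : x + m * 2 - 1 = (x - 1) + 1 * (m * 2) := by ring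
  rw [h1, h2, Int.add_mul_ediv_right _ _ (by omega : m ≠ 0),
      Int.add_mul_ediv_right _ _ (by positivity : m * 2 ≠ 0)]
  have h3 : (x - 1) / m + 1 + 2 * 1 - 3 = (x - 1) / m := by ring
  rw [h3, Int.ediv_ediv_of_nonneg (le_of_lt hm)]

-- the shift form is ceiling division by 2^k, written with floor division
lemma pv_shift_ceil (x : Int) (k : Nat) :
    -((-x) >>> k) = PySem.Int.floordiv (x + 2 ^ k - 1) (2 ^ k) := by
  have hm : (0 : Int) < 2 ^ k := by positivity
  have hc : ((2 ^ k : Nat) : Int) = 2 ^ k := by push_cast; ring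
  rw [Int.shiftRight_eq_div_pow, hc, ← PySem.Int.floordiv_eq_ediv_of_pos hm]
  set q : Int := PySem.Int.floordiv (x + 2 ^ k - 1) (2 ^ k) with hq
  have h1 := (PySem.Int.floordiv_eq_iff_of_pos hm).mp hq.symm
  refine (PySem.Int.neg_floordiv_neg_eq_iff_of_pos hm).mpr ⟨?_, ?_⟩ <;> nlinarith [h1.1, h1.2]

-- pvLayerB rewritten as ceiling division by factor = 2^(j-1)
lemma pvLayerB_eq (h w d j : Int) :
    pvLayerB h w d j =
      (PySem.Int.floordiv (h + 2 ^ (j - 1).toNat - 1) (2 ^ (j - 1).toNat),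
       PySem.Int.floordiv (w + 2 ^ (j - 1).toNat - 1) (2 ^ (j - 1).toNat),
       PySem.Int.floordiv (d + 2 ^ (j - 1).toNat - 1) (2 ^ (j - 1).toNat)) := by
  simp [pvLayerB, pv_shift_ceil]

-- pvLayerB at layer 1 is the identity (factor 1)
lemma pv_layer_one (h w d : Int) : pvLayerB h w d 1 = (h, w, d) := by
  simp [pvLayerB_eq, PySem.Int.floordiv]

-- applying A's stride-2 step (i ≠ 0) to layer n yields layer n+1, for n ≥ 1
lemma pv_step_layer (h w d : Int) (n : Nat) (hn : 1 ≤ n) :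
    pvStepA (dims, pvLayerB h w d n) (n : Int) =
      (dims ++ [pvLayerB h w d ((n : Int) + 1)], pvLayerB h w d ((n : Int) + 1)) := by
  have hne : ((n : Int)) ≠ 0 := by exact_mod_cast Nat.one_le_iff_ne_zero.mp hn
  have hfac : ((n : Int) + 1 - 1).toNat = ((n : Int) - 1).toNat + 1 := by omega
  have hpow : (2 : Int) ^ (((n : Int) + 1 - 1).toNat) = 2 ^ (((n : Int) - 1).toNat) * 2 := by
    rw [hfac, pow_succ]
  have hm : (0 : Int) < 2 ^ (((n : Int) - 1).toNat) := by positivity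
  simp only [pvStepA, pvLayerB_eq, if_neg hne, hpow]
  refine congrArg (fun t => (dims ++ [t], t)) ?_
  refine Prod.ext ?_ (Prod.ext ?_ ?_) <;>
    simpa using pv_ceil_half _ _ hm

-- invariant of A's fold over range(n)
lemma pv_fold_inv (h w d : Int) (n : Nat) :
    (PySem.List.pyRange 0 (n : Int) 1).foldl pvStepA ([(h, w, d)], (h, w, d)) =
      ((h, w, d) :: (PySem.List.pyRange 1 ((n : Int) + 1) 1).map (pvLayerB h w d),
       if n = 0 then (h, w, d) else pvLayerB h w d (n : Int)) := by
  induction n with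
  | zero =>
      simp
  | succ n ih =>
      have hsplit : PySem.List.pyRange 0 ((n : Int) + 1) 1 =
          PySem.List.pyRange 0 (n : Int) 1 ++ [(n : Int)] :=
        PySem.List.pyRange_one_succ_right (by positivity)
      have hsplit2 : PySem.List.pyRange 1 ((n : Int) + 1 + 1) 1 =
          PySem.List.pyRange 1 ((n : Int) + 1) 1 ++ [(n : Int) + 1] :=
        PySem.List.pyRange_one_succ_right (by omega)
      push_cast
      rw [hsplit, List.foldl_append, ih, hsplit2]
      by_cases h0 : n = 0
      · subst h0
        simp [pvStepA, pv_layer_one]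
      · have h1 : 1 ≤ n := Nat.one_le_iff_ne_zero.mpr h0
        simp only [List.foldl_cons, List.foldl_nil, if_neg h0]
        rw [pv_step_layer h w d n h1]
        simp

-- ===== VERDICT (by name: the statement is the Claim_ definition above) =====
theorem compute_encoder_spatial_dims_py_spec : Claim_equal_compute_encoder_spatial_dims_py := by
  intro input_shape num_layers _
  obtain ⟨h, w, d⟩ := input_shape
  unfold Spec_compute_encoder_spatial_dims_py
  unfold compute_encoder_spatial_dims_py compute_encoder_spatial_dims_py_alt
  rcases le_or_gt num_layers 0 with hle | hpos
  · rw [PySem.List.pyRange_one_eq_nil hle, PySem.List.pyRange_one_eq_nil (by omega)]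
    simp
  · have hn : num_layers = ((num_layers.toNat : Int)) := by omega
    rw [hn, pv_fold_inv]
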